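-- pv_equiv track=rewrite | github.com/mbartnicki80/WDI | zestaw6/zad31zestaw6.py | solve
-- ===== SOURCE A (Python) =====
-- def solve(t, ind, dl, t1):
--
--     if ind==dl:
--         if len(t1)>0:
--             iloczyn = 1
--             for i in t1:
--                 iloczyn *= i
--             return iloczyn
--         return False
--
--     suma = 0
--     suma += solve(t, ind+1, dl, t1+[t[ind]])
--     suma += solve(t, ind+1, dl, t1)
--
--     return suma
-- ===== SOURCE B (Python) =====
-- def solve(t, ind, dl, t1):
--     p = 1
--     for i in range(ind, dl):
--         p *= 1 + t[i]
--     if t1: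
--         q = 1
--         for x in t1:
--             q *= x
--         return q * p
--     return p - 1
-- ===== Notes on version B (the rewrite author's own statement) =====
-- stated objective: alternative
-- what changed: Replaces the O(2^n) recursion enumerating all subsets of t[ind:dl] with the closed form prod(t1)*prod(1+t[i]) (minus 1 when t1 is empty), computed in one linear pass (exponentially fewer multiplications, though huge intermediate products dominate on big inputs).
-- outside the precondition, e.g. on solve([], 0, 0, []): A returns False, B returns 0
import Mathlib
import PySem

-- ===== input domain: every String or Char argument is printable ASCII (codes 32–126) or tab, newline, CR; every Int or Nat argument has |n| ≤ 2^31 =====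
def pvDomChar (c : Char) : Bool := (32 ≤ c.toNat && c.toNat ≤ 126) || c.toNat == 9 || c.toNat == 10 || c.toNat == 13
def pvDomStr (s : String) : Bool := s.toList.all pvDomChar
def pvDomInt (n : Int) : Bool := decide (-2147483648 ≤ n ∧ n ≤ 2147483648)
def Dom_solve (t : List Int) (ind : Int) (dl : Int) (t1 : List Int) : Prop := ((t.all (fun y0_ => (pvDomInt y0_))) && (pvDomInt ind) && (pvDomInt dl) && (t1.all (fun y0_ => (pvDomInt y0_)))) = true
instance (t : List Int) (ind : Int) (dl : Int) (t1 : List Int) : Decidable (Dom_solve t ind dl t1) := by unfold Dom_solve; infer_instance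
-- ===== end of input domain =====

-- B replaces A's subset-enumeration recursion with the closed form
-- prod(t1)*prod(1+t[i]) (minus 1 when t1 is empty); objective: alternative.


-- ===== PORT A =====
-- A's recursion on ind; fuel (dl-ind).toNat counts the remaining recursion depth
-- (under Pre_ the recursion terminates exactly when ind reaches dl).
-- 'return False' at ind==dl with empty t1 is rendered as 0 (its Python arithmetic value);
-- Pre_ excludes the one input shape where that False is the returned value.
def solveA (t : List Int) (dl : Int) : Nat → Int → List Int → Int
  | 0, _, t1 =>
      if t1.length > 0 then t1.foldl (fun iloczyn i => iloczyn * i) 1 else 0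
  | n+1, ind, t1 =>
      match PySem.List.pyGet? t ind with
      | some x => ((0 : Int) + solveA t dl n (ind+1) (t1 ++ [x])) + solveA t dl n (ind+1) t1
      | none => 0   -- IndexError: excluded by Pre_

def solve (t : List Int) (ind : Int) (dl : Int) (t1 : List Int) : Int :=
  solveA t dl ((dl - ind).toNat) ind t1

-- ===== PORT B =====
def solve_alt (t : List Int) (ind : Int) (dl : Int) (t1 : List Int) : Int :=
  let p := (PySem.List.pyRange ind dl 1).foldl
      (fun p i => p * (1 + PySem.List.pyGetD t i 0)) 1   -- t[i]; in range under Pre_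
  if t1 ≠ [] then (t1.foldl (fun q x => q * x) 1) * p else p - 1

-- ===== PRECONDITION & SPEC =====
-- Pre_ excludes: (a) dl < ind and out-of-range indices in ind..dl-1, where A raises
-- IndexError; (b) ind = dl with empty t1, where A returns False (a bool, not an int).
def Pre_solve (t : List Int) (ind : Int) (dl : Int) (t1 : List Int) : Prop :=
  ind ≤ dl ∧ (ind < dl → -(t.length : Int) ≤ ind ∧ dl ≤ (t.length : Int)) ∧
    ¬(ind = dl ∧ t1 = [])
instance (t : List Int) (ind : Int) (dl : Int) (t1 : List Int) : Decidable (Pre_solve t ind dl t1) := by unfold Pre_solve; infer_instance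
def pvWitness_solve : List Int × Int × Int × List Int := ([2, 3, 4], 0, 3, [])

def Spec_solve (t : List Int) (ind : Int) (dl : Int) (t1 : List Int) (out : Int) : Prop := out = solve_alt t ind dl t1
instance (t : List Int) (ind : Int) (dl : Int) (t1 : List Int) (out : Int) : Decidable (Spec_solve t ind dl t1 out) := by unfold Spec_solve; infer_instance

-- ===== CLAIM (what is proved, stated in full; the proofs are below) =====
def Claim_equal_solve : Prop := ∀ (t : List Int) (ind : Int) (dl : Int) (t1 : List Int), Dom_solve t ind dl t1 → Pre_solve t ind dl t1 → Spec_solve t ind dl t1 (solve t ind dl t1)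
-- ===== LEMMAS AND PROOFS =====

-- foldl of a running product pulls the accumulator out as a factor
lemma foldl_mul (l : List Int) (a : Int) :
    l.foldl (fun q x => q * x) a = a * l.prod := by
  induction l generalizing a with
  | nil => simp
  | cons x xs ih => simp [List.foldl_cons, ih, List.prod_cons]; ring

-- same, with a function applied to each element (the shape of B's product loop)
lemma foldl_mul_factor (g : Int → Int) (l : List Int) (a : Int) :
    l.foldl (fun acc i => acc * g i) a = a * (l.map g).prod := by
  induction l generalizing a with
  | nil => simp
  | cons x xs ih => simp [List.foldl_cons, ih, List.prod_cons]; ring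

-- value of A's recursion under the valid-index hypothesis
lemma solveA_eq (t : List Int) (dl : Int) :
    ∀ (n : Nat) (ind : Int) (t1 : List Int), ind + n = dl →
      (∀ i ∈ PySem.List.pyRange ind dl 1, PySem.Raise.InRange t.length i) →
      solveA t dl n ind t1 =
        t1.prod * ((PySem.List.pyRange ind dl 1).map
            (fun i => 1 + PySem.List.pyGetD t i 0)).prod -
          (if t1 = [] then 1 else 0) := by
  intro n
  induction n with
  | zero =>
      intro ind t1 h _
      have hr : PySem.List.pyRange ind dl 1 = [] :=
        PySem.List.pyRange_one_eq_nil (by omega)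
      rcases t1 with _ | ⟨x, xs⟩
      · simp [solveA, hr]
      · simp only [solveA, hr, List.length_cons, List.foldl_cons, one_mul,
          List.map_nil, List.prod_nil, mul_one]
        simp [foldl_mul, List.prod_cons]
  | succ n ih =>
      intro ind t1 h hin
      have hlt : ind < dl := by omega
      have hr : PySem.List.pyRange ind dl 1 = ind :: PySem.List.pyRange (ind+1) dl 1 :=
        PySem.List.pyRange_one_cons hlt
      have hmem : PySem.Raise.InRange t.length ind :=
        hin ind (by rw [hr]; exact List.mem_cons_self ..)
      have hne : PySem.List.pyGet? t ind ≠ none := by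
        rw [Ne, PySem.List.pyGet?_eq_none_iff]; exact not_not_intro hmem
      obtain ⟨x, hx⟩ := Option.ne_none_iff_exists'.mp hne
      have hin' : ∀ i ∈ PySem.List.pyRange (ind+1) dl 1, PySem.Raise.InRange t.length i :=
        fun i hi => hin i (by rw [hr]; exact List.mem_cons_of_mem _ hi)
      have h1 := ih (ind+1) (t1 ++ [x]) (by omega) hin'
      have h2 := ih (ind+1) t1 (by omega) hin'
      have hxd : PySem.List.pyGetD t ind 0 = x := by
        simp [PySem.List.pyGetD, hx]
      rw [hr]
      simp only [solveA, hx, h1, h2, List.map_cons, List.prod_cons, hxd,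
        List.prod_append, zero_add,
        List.append_eq_nil_iff, List.cons_ne_nil, and_false, if_false, List.prod_nil, mul_one]
      split_ifs <;> ring

theorem solve_spec : Claim_equal_solve := by
  intro t ind dl t1 _ hpre
  obtain ⟨hle, hbnd, hcorner⟩ := hpre
  have hin : ∀ i ∈ PySem.List.pyRange ind dl 1, PySem.Raise.InRange t.length i := by
    intro i hi
    rw [PySem.List.mem_pyRange_one] at hi
    have hb := hbnd (by omega)
    simp only [PySem.Raise.InRange]
    omega
  unfold Spec_solve solve solve_alt
  have hn : ind + (((dl - ind).toNat : Nat) : Int) = dl := by omega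
  rw [solveA_eq t dl _ ind t1 hn hin]
  rw [foldl_mul_factor (fun i => 1 + PySem.List.pyGetD t i 0)]
  by_cases ht : t1 = []
  · simp [ht]
  · simp only [ht, if_false, sub_zero, ne_eq, not_false_eq_true, if_true, foldl_mul, one_mul]
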